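-- pv_equiv track=rewrite | github.com/Julesc013/dominium | src/control/view/view_engine.py | resolve_view_policy_id
-- ===== SOURCE A (Python) =====
-- from typing import Dict, List, Mapping, Sequence
--
-- def _as_map(value: object) -> dict:
--     return dict(value or {}) if isinstance(value, Mapping) else {}
--
-- def _sorted_unique_strings(values: object) -> List[str]:
--     if not isinstance(values, list):
--         values = []
--     return sorted(set(str(item).strip() for item in values if str(item).strip()))
--
-- def resolve_view_policy_id(requested_id: str, policy_rows_by_id: Mapping[str, Mapping[str, object]]) -> str:
--     requested = str(requested_id or "").strip()
--     if not requested: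
--         return ""
--     if requested in policy_rows_by_id:
--         return requested
--     for policy_id in sorted(policy_rows_by_id.keys()):
--         policy = _as_map(policy_rows_by_id.get(policy_id))
--         legacy_rows = _sorted_unique_strings(_as_map(policy.get("extensions")).get("legacy_view_mode_ids"))
--         if requested in legacy_rows:
--             return str(policy_id)
--     return ""
-- ===== SOURCE B (Python) =====
-- from typing import Mapping
--
-- def resolve_view_policy_id(requested_id: str, policy_rows_by_id: Mapping[str, Mapping[str, object]]) -> str:
--     requested = str(requested_id or "").strip()
--     if not requested:
--         return ""
--     if requested in policy_rows_by_id: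
--         return requested
--     best = None
--     for policy_id, policy in policy_rows_by_id.items():
--         extensions = dict(policy or {}).get("extensions") or {}
--         legacy = dict(extensions).get("legacy_view_mode_ids")
--         items = legacy if isinstance(legacy, list) else []
--         if any(str(item).strip() == requested for item in items):
--             if best is None or policy_id < best:
--                 best = policy_id
--     return "" if best is None else str(best)
-- ===== Notes on version B (the rewrite author's own statement) =====
-- stated objective: alternative
-- what changed: A sorts all policy ids and, for each candidate in order, builds a sorted deduplicated list of its cleaned legacy ids before a membership test with early exit; B does no sorting at all: one unsorted pass over the policies with a short-circuiting any() per legacy list, keeping the lexicographically smallest matching policy id in an accumulator.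
import Mathlib
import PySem

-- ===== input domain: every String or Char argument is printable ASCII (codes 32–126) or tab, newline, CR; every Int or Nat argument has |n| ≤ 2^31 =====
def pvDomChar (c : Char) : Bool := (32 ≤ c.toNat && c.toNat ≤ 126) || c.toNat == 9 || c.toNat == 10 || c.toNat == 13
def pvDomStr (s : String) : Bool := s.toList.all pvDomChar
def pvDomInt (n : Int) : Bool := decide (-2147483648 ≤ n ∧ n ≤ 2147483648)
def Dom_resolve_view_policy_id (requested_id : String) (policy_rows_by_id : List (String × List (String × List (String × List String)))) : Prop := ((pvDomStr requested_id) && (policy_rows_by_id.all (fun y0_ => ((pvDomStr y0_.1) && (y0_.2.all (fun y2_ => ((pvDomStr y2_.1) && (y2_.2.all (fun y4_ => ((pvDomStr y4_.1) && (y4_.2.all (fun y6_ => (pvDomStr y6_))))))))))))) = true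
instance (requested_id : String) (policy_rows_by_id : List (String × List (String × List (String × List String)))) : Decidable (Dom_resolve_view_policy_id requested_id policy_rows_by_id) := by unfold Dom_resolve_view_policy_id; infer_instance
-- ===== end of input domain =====

-- B replaces A's sort-all-keys-then-scan (with a sorted-set rebuild per policy) by a single
-- unsorted pass keeping the minimum matching policy id; objective: alternative algorithm, same cost.


-- ===== PORT A =====
-- _as_map(value): dict(value or {}) — the input is an Option of an association list here
def pvAsMap {κ ν : Type} [BEq κ] (value : Option (List (κ × ν))) : PySem.Dict κ ν :=
  PySem.Dict.ofList (value.getD [])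

-- _sorted_unique_strings(values) (values is always a list of strings in this typed domain)
def pvSortedUniqueStrings (values : List String) : List String :=
  PySem.List.sorted
    (PySem.Set.ofList ((values.map PySem.Str.strip).filter (fun s => s ≠ "")))
    (fun x => x) false

-- the 'for policy_id in sorted(policy_rows_by_id.keys()): … return …' loop of A
def pvScanA (requested : String)
    (d : PySem.Dict String (List (String × List (String × List String)))) :
    List String → String
  | [] => ""
  | policy_id :: rest =>
    let policy := pvAsMap (d.get? policy_id)
    let legacy_rows :=
      pvSortedUniqueStrings (((pvAsMap (policy.get? "extensions")).get? "legacy_view_mode_ids").getD [])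
    if requested ∈ legacy_rows then policy_id else pvScanA requested d rest

def resolve_view_policy_id (requested_id : String)
    (policy_rows_by_id : List (String × List (String × List (String × List String)))) : String :=
  let d : PySem.Dict String (List (String × List (String × List String))) :=
    PySem.Dict.ofList policy_rows_by_id
  let requested := PySem.Str.strip requested_id
  if requested = "" then ""
  else if d.contains requested then requested
  else pvScanA requested d (PySem.List.sorted d.keys (fun x => x) false)

-- ===== PORT B =====
def resolve_view_policy_id_alt (requested_id : String)
    (policy_rows_by_id : List (String × List (String × List (String × List String)))) : String :=
  let d : PySem.Dict String (List (String × List (String × List String))) :=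
    PySem.Dict.ofList policy_rows_by_id
  let requested := PySem.Str.strip requested_id
  if requested = "" then ""
  else if d.contains requested then requested
  else
    let best := d.items.foldl (fun best p =>
      let extensions := (PySem.Dict.ofList p.2).getD "extensions" []
      let items := ((PySem.Dict.ofList extensions).get? "legacy_view_mode_ids").getD []
      if items.any (fun item => PySem.Str.strip item == requested) then
        match best with
        | none => some p.1
        | some b => if p.1 < b then some p.1 else some b
      else best) none
    match best with
    | none => ""
    | some b => b

-- ===== PRECONDITION & SPEC =====
def Spec_resolve_view_policy_id (requested_id : String) (policy_rows_by_id : List (String × List (String × List (String × List String)))) (out : String) : Prop := out = resolve_view_policy_id_alt requested_id policy_rows_by_id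
instance (requested_id : String) (policy_rows_by_id : List (String × List (String × List (String × List String)))) (out : String) : Decidable (Spec_resolve_view_policy_id requested_id policy_rows_by_id out) := by unfold Spec_resolve_view_policy_id; infer_instance

-- ===== CLAIM (what is proved, stated in full; the proofs are below) =====
def Claim_equal_resolve_view_policy_id : Prop := ∀ (requested_id : String) (policy_rows_by_id : List (String × List (String × List (String × List String)))), Dom_resolve_view_policy_id requested_id policy_rows_by_id → Spec_resolve_view_policy_id requested_id policy_rows_by_id (resolve_view_policy_id requested_id policy_rows_by_id)

-- ===== LEMMAS AND PROOFS =====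

-- the per-key test both programs share, phrased as B computes it
def pvQ (requested : String)
    (d : PySem.Dict String (List (String × List (String × List String)))) (k : String) : Bool :=
  ((((pvAsMap ((pvAsMap (d.get? k)).get? "extensions")).get? "legacy_view_mode_ids").getD []).any
    (fun item => PySem.Str.strip item == requested))

-- the min-accumulator step of B, with the test abstracted out
def pvJoinMin (acc : Option String) (k : String) : Option String :=
  match acc with
  | none => some k
  | some b => if k < b then some k else some b

-- membership in A's sorted-unique cleaned list = B's any-test (for nonempty requested)
lemma pv_mem_sortedUnique (requested : String) (hreq : requested ≠ "") (items : List String) :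
    (requested ∈ pvSortedUniqueStrings items) ↔
      items.any (fun item => PySem.Str.strip item == requested) = true := by
  unfold pvSortedUniqueStrings
  rw [PySem.List.mem_sorted, PySem.Set.mem_ofList, List.mem_filter, List.any_eq_true]
  simp only [List.mem_map, beq_iff_eq, decide_eq_true_eq]
  constructor
  · rintro ⟨⟨i, hi, he⟩, -⟩; exact ⟨i, hi, he⟩
  · rintro ⟨i, hi, he⟩; exact ⟨⟨i, hi, he⟩, by simpa [he] using hreq⟩

-- A's scan is find? of pvQ over the key list
lemma pv_scanA_eq_find (requested : String) (hreq : requested ≠ "")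
    (d : PySem.Dict String (List (String × List (String × List String))))
    (ks : List String) :
    pvScanA requested d ks = ((ks.find? (pvQ requested d)).getD "") := by
  induction ks with
  | nil => rfl
  | cons k rest ih =>
    simp only [pvScanA, List.find?_cons]
    by_cases hm : requested ∈ pvSortedUniqueStrings
        (((pvAsMap ((pvAsMap (d.get? k)).get? "extensions")).get? "legacy_view_mode_ids").getD [])
    · have hq : pvQ requested d k = true := (pv_mem_sortedUnique requested hreq _).mp hm
      rw [if_pos hm, hq]; rfl
    · have hq : pvQ requested d k = false := by
        cases hqq : pvQ requested d k with
        | true => exact absurd ((pv_mem_sortedUnique requested hreq _).mpr hqq) hm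
        | false => rfl
      rw [if_neg hm, hq, ih]

-- B's fold over items is the pvJoinMin fold over the matching keys
lemma pv_fold_items_eq (requested : String)
    (d : PySem.Dict String (List (String × List (String × List String)))) (l : List (String × List (String × List (String × List String)))) (acc : Option String)
    (h : ∀ p ∈ l, d.get? p.1 = some p.2) :
    l.foldl (fun best p =>
      let extensions := (PySem.Dict.ofList p.2).getD "extensions" []
      let items := ((PySem.Dict.ofList extensions).get? "legacy_view_mode_ids").getD []
      if items.any (fun item => PySem.Str.strip item == requested) then
        match best with
        | none => some p.1
        | some b => if p.1 < b then some p.1 else some b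
      else best) acc
    = (l.map Prod.fst).foldl (fun acc k => if pvQ requested d k then pvJoinMin acc k else acc) acc := by
  induction l generalizing acc with
  | nil => rfl
  | cons p rest ih =>
    have hp : d.get? p.1 = some p.2 := h p (List.mem_cons_self)
    have hq : pvQ requested d p.1
        = (((PySem.Dict.ofList ((PySem.Dict.ofList p.2).getD "extensions" []) :
              PySem.Dict String (List String)).get? "legacy_view_mode_ids").getD []).any
            (fun item => PySem.Str.strip item == requested) := by
      unfold pvQ pvAsMap
      rw [hp]
      rfl
    simp only [List.map_cons, List.foldl_cons]
    rw [ih _ (fun q hq => h q (List.mem_cons_of_mem _ hq))]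
    congr 1
    rw [hq]
    by_cases hb : (((PySem.Dict.ofList ((PySem.Dict.ofList p.2).getD "extensions" []) :
              PySem.Dict String (List String)).get? "legacy_view_mode_ids").getD []).any
            (fun item => PySem.Str.strip item == requested) = true
    · simp only [hb, if_true]; rfl
    · simp only [Bool.not_eq_true] at hb; simp only [hb, if_false, Bool.false_eq_true]

-- pvJoinMin fold of a ≤-sorted list from none is its head
lemma pv_fold_joinMin_sorted (m : List String) (hm : m.Pairwise (· ≤ ·)) :
    m.foldl pvJoinMin none = m.head? := by
  cases m with
  | nil => rfl
  | cons a t =>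
    have hle : ∀ x ∈ t, a ≤ x := fun x hx => (List.pairwise_cons.mp hm).1 x hx
    have key : ∀ (t : List String), (∀ x ∈ t, a ≤ x) → t.foldl pvJoinMin (some a) = some a := by
      intro t
      induction t with
      | nil => intro _; rfl
      | cons b t ih =>
        intro hb
        have hab : ¬ b < a := not_lt.mpr (hb b List.mem_cons_self)
        simp only [List.foldl_cons, pvJoinMin, if_neg hab]
        exact ih (fun x hx => hb x (List.mem_cons_of_mem _ hx))
    simpa [pvJoinMin] using key t hle

lemma pv_joinMin_comm (acc : Option String) (a b : String) :
    pvJoinMin (pvJoinMin acc a) b = pvJoinMin (pvJoinMin acc b) a := by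
  have hmin : ∀ (b k : String), pvJoinMin (some b) k = some (min b k) := by
    intro b k
    simp only [pvJoinMin]
    rcases lt_or_ge k b with h | h
    · rw [if_pos h, min_eq_right h.le]
    · rw [if_neg (not_lt.mpr h), min_eq_left h]
  cases acc with
  | none =>
    show pvJoinMin (some a) b = pvJoinMin (some b) a
    rw [hmin, hmin, min_comm]
  | some c =>
    rw [hmin, hmin, hmin, hmin, min_assoc, min_assoc, min_comm a b]

-- core: find? over the sorted keys = min-fold over the unsorted keys
lemma pv_find_sorted_eq_fold (Q : String → Bool) (l : List String) :
    (PySem.List.sorted l (fun x => x) false).find? Q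
      = l.foldl (fun acc k => if Q k then pvJoinMin acc k else acc) none := by
  have hfilter : ∀ (m : List String) (acc : Option String),
      m.foldl (fun acc k => if Q k then pvJoinMin acc k else acc) acc
        = (m.filter Q).foldl pvJoinMin acc := by
    intro m
    induction m with
    | nil => intro acc; rfl
    | cons a t ih =>
      intro acc
      by_cases hq : Q a = true
      · simp only [List.foldl_cons, List.filter_cons_of_pos hq, if_pos hq, ih]
      · simp only [Bool.not_eq_true] at hq
        rw [List.foldl_cons, List.filter_cons_of_neg (by simp [hq]), hq]
        simp only [Bool.false_eq_true, if_false]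
        exact ih acc
  rw [hfilter]
  -- find? over sorted = head? of the filtered sorted list
  rw [← List.head?_filter]
  have hperm : ((PySem.List.sorted l (fun x => x) false).filter Q).Perm (l.filter Q) :=
    (PySem.List.sorted_perm l (fun x => x) false).filter Q
  have hpair : ((PySem.List.sorted l (fun x => x) false).filter Q).Pairwise (· ≤ ·) :=
    (PySem.List.sorted_pairwise l (fun x => x)).filter Q
  rw [← pv_fold_joinMin_sorted _ hpair]
  exact (@List.Perm.foldl_eq _ _ pvJoinMin _ _ ⟨fun acc a b => pv_joinMin_comm acc a b⟩ hperm.symm none).symm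

-- ===== VERDICT (by name: the statement is the Claim_ definition above) =====
theorem resolve_view_policy_id_spec : Claim_equal_resolve_view_policy_id := by
  intro requested_id rows _
  unfold Spec_resolve_view_policy_id resolve_view_policy_id resolve_view_policy_id_alt
  by_cases h0 : PySem.Str.strip requested_id = ""
  · simp [h0]
  · simp only [h0, if_false]
    by_cases h1 : (PySem.Dict.ofList rows : PySem.Dict String (List (String × List (String × List String)))).contains (PySem.Str.strip requested_id)
    · simp [h1]
    · simp only [Bool.not_eq_true] at h1
      simp only [h1, Bool.false_eq_true, if_false]
      set d : PySem.Dict String (List (String × List (String × List String))) :=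
        PySem.Dict.ofList rows with hd
      set requested := PySem.Str.strip requested_id with hr
      have hnd : d.keys.Nodup := PySem.Dict.nodup_keys_ofList rows
      have hitems : ∀ p ∈ d.items, d.get? p.1 = some p.2 := by
        intro p hp
        exact PySem.Dict.get?_of_mem_items d (by exact hp) hnd
      rw [pv_scanA_eq_find requested h0 d,
        pv_fold_items_eq requested d d.items none hitems,
        pv_find_sorted_eq_fold (pvQ requested d) d.keys]
      have hkeys : d.items.map Prod.fst = d.keys := rfl
      rw [hkeys]
      cases d.keys.foldl (fun acc k => if pvQ requested d k then pvJoinMin acc k else acc) none with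
      | none => rfl
      | some b => rfl
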